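-- pv_equiv track=rewrite | github.com/kanchanraiii/PR_Quality_Checker | metrics_dashboard/templates/app.py | count_prs
-- ===== SOURCE A (Python) =====
-- def count_prs(pr_data):
--     open_prs = sum(1 for pr in pr_data if pr['state'] == 'open')
--     closed_prs = sum(1 for pr in pr_data if pr['state'] == 'closed')
--     merged_prs = sum(1 for pr in pr_data if pr.get('merged_at') is not None)
--
--     return {
--         "open": open_prs,
--         "closed": closed_prs,
--         "merged": merged_prs
--     }
-- ===== SOURCE B (Python) =====
-- def count_prs(pr_data):
--     open_c = 0
--     closed_c = 0
--     merged_c = 0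
--     for pr in pr_data:
--         state = pr['state']
--         if state == 'open':
--             open_c += 1
--         elif state == 'closed':
--             closed_c += 1
--         if pr.get('merged_at') is not None:
--             merged_c += 1
--     return {"open": open_c, "closed": closed_c, "merged": merged_c}
-- ===== Notes on version B (the rewrite author's own statement) =====
-- stated objective: alternative
-- what changed: Replaced A's three independent generator-expression scans over pr_data with a single explicit loop maintaining three counters, branching on pr['state'] and on pr.get('merged_at').
import Mathlib
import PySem

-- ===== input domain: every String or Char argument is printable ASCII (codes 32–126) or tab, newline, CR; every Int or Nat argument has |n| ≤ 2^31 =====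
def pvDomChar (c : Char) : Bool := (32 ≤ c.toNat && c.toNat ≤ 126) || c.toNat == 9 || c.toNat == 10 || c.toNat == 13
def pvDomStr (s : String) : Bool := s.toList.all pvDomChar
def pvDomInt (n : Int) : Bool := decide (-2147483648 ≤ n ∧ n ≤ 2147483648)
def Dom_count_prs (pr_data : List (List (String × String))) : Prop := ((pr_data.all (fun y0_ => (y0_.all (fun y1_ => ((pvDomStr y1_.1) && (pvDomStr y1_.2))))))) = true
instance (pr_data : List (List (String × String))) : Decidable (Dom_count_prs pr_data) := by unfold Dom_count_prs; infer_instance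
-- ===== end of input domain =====

-- B fuses A's three scans over pr_data into one counting loop (constant-factor change; return value only).

-- shared dict primitive: pr[k] / pr.get(k) on an insertion-ordered dict = first-match lookup
def prGet? (pr : List (String × String)) (k : String) : Option String :=
  (pr.find? (fun kv => kv.1 == k)).map (·.2)

-- ===== PORT A =====
def count_prs (pr_data : List (List (String × String))) : List (String × Int) :=
  let open_prs := pr_data.foldl (fun acc pr => if prGet? pr "state" = some "open" then acc + 1 else acc) (0 : Int)
  let closed_prs := pr_data.foldl (fun acc pr => if prGet? pr "state" = some "closed" then acc + 1 else acc) (0 : Int)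
  let merged_prs := pr_data.foldl (fun acc pr => if (prGet? pr "merged_at").isSome then acc + 1 else acc) (0 : Int)
  [("open", open_prs), ("closed", closed_prs), ("merged", merged_prs)]

-- ===== PORT B =====
def countLoop : List (List (String × String)) → Int → Int → Int → Int × Int × Int
  | [], o, c, m => (o, c, m)
  | pr :: rest, o, c, m =>
    let st := prGet? pr "state"
    let o' := if st = some "open" then o + 1 else o
    let c' := if st = some "open" then c else if st = some "closed" then c + 1 else c
    let m' := if (prGet? pr "merged_at").isSome then m + 1 else m
    countLoop rest o' c' m'

def count_prs_alt (pr_data : List (List (String × String))) : List (String × Int) :=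
  let r := countLoop pr_data 0 0 0
  [("open", r.1), ("closed", r.2.1), ("merged", r.2.2)]

-- ===== PRECONDITION & SPEC =====
-- Pre_: A raises KeyError when some pr lacks a 'state' key (so does B); exclude exactly those.
def Pre_count_prs (pr_data : List (List (String × String))) : Prop :=
  (pr_data.all (fun pr => (prGet? pr "state").isSome)) = true
instance (pr_data : List (List (String × String))) : Decidable (Pre_count_prs pr_data) := by unfold Pre_count_prs; infer_instance
def pvWitness_count_prs : (List (List (String × String))) := [[("state", "open"), ("merged_at", "2024-01-01")], [("state", "closed")]]

def Spec_count_prs (pr_data : List (List (String × String))) (out : List (String × Int)) : Prop := out = count_prs_alt pr_data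
instance (pr_data : List (List (String × String))) (out : List (String × Int)) : Decidable (Spec_count_prs pr_data out) := by unfold Spec_count_prs; infer_instance

-- ===== CLAIM (what is proved, stated in full; the proofs are below) =====
def Claim_equal_count_prs : Prop := ∀ (pr_data : List (List (String × String))), Dom_count_prs pr_data → Pre_count_prs pr_data → Spec_count_prs pr_data (count_prs pr_data)

-- ===== LEMMAS AND PROOFS =====
lemma countLoop_eq (l : List (List (String × String))) :
    ∀ (o c m : Int), countLoop l o c m =
      (l.foldl (fun acc pr => if prGet? pr "state" = some "open" then acc + 1 else acc) o,
       l.foldl (fun acc pr => if prGet? pr "state" = some "closed" then acc + 1 else acc) c,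
       l.foldl (fun acc pr => if (prGet? pr "merged_at").isSome then acc + 1 else acc) m) := by
  induction l with
  | nil => intro o c m; rfl
  | cons pr rest ih =>
    intro o c m
    simp only [countLoop, List.foldl_cons, ih]
    by_cases h : prGet? pr "state" = some "open"
    · simp [h]
    · simp [h]

-- ===== VERDICT (by name: the statement is the Claim_ definition above) =====
theorem count_prs_spec : Claim_equal_count_prs := by
  intro pr_data _ _
  show _ = _
  simp [count_prs, count_prs_alt, countLoop_eq]
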